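-- pv_equiv track=rewrite | github.com/intuitem/ciso-assistant-community | backend/scripts/convert_ccm.py | pretify_content
-- ===== SOURCE A (Python) =====
-- def pretify_content(content):
--     res = None
--     stop_join = False
--     for line in content.splitlines():
--         if stop_join:
--             res = res + "\n" + line if res else line
--         else:
--             res = res + " " + line if res else line
--         if line[-1] == ":":
--             stop_join = True
--     return res
-- ===== SOURCE B (Python) =====
-- def pretify_content(content):
--     lines = content.splitlines()
--     if not lines:
--         return None
--     k = next((i for i, ln in enumerate(lines) if ln.endswith(":")), len(lines) - 1)
--     head = " ".join(lines[:k + 1])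
--     tail = lines[k + 1:]
--     return head + "\n" + "\n".join(tail) if tail else head
-- ===== Notes on version B (the rewrite author's own statement) =====
-- stated objective: simpler
-- what changed: Replaces the stateful accumulate-with-flag loop by finding the index of the first line ending in ':' and then building the result with two joins over the two slices.
-- outside the precondition, e.g. on pretify_content(''): A returns None, B returns None
import Mathlib
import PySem

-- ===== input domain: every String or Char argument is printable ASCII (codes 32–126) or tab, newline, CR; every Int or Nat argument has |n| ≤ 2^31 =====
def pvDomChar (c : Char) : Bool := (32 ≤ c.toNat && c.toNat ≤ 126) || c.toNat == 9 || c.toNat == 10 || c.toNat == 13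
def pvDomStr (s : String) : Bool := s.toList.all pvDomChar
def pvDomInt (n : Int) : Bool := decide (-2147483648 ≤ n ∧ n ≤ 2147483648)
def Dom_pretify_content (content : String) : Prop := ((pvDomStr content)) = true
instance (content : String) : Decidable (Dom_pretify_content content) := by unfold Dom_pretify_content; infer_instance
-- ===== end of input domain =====

-- B replaces A's stateful accumulate-with-flag loop by locating the first ':'-ending line
-- and joining the two slices (objective: simpler).

-- ===== PORT A =====
-- one loop iteration: res/stop_join state, branch order as in the Python
def pretifyStep (st : Option (List Char) × Bool) (line : List Char) : Option (List Char) × Bool :=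
  let res :=
    if st.2 then
      match st.1 with
      | some s => if s ≠ [] then some (s ++ '\n' :: line) else some line
      | none   => some line
    else
      match st.1 with
      | some s => if s ≠ [] then some (s ++ ' ' :: line) else some line
      | none   => some line
  (res, if PySem.List.pyGet? line (-1) = some ':' then true else st.2)

-- Python returns res, which is None only when splitlines is empty (excluded by Pre_): getD [] there
def pretify_content (content : String) : String :=
  String.mk ((((PySem.Chars.splitlines content.toList).foldl pretifyStep (none, false)).1).getD [])

-- ===== PORT B =====
def pretifyAltChars (lines : List (List Char)) : List Char :=
  let k := (lines.findIdx? (fun l => PySem.Chars.endswith l [':'])).getD (lines.length - 1)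
  let head := PySem.Chars.join [' '] (lines.take (k + 1))
  let tail := lines.drop (k + 1)
  if tail ≠ [] then head ++ '\n' :: PySem.Chars.join ['\n'] tail else head

-- Source B returns None only when lines is empty (excluded by Pre_); there pretifyAltChars gives ""
def pretify_content_alt (content : String) : String :=
  String.mk (pretifyAltChars (PySem.Chars.splitlines content.toList))

-- ===== PRECONDITION & SPEC =====
-- Pre_ excludes content with no lines at all (A returns None, not a str — see cites; B also
-- returns None there) and content whose lines include an empty line, where A raises
-- IndexError at line[-1] while B would return the joined string.
def Pre_pretify_content (content : String) : Prop :=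
  PySem.Chars.splitlines content.toList ≠ [] ∧
    ∀ l ∈ PySem.Chars.splitlines content.toList, l ≠ []
instance (content : String) : Decidable (Pre_pretify_content content) := by
  unfold Pre_pretify_content; infer_instance
def pvWitness_pretify_content : String := "ab:\ncd"

def Spec_pretify_content (content : String) (out : String) : Prop := out = pretify_content_alt content
instance (content : String) (out : String) : Decidable (Spec_pretify_content content out) := by unfold Spec_pretify_content; infer_instance

-- ===== CLAIM (what is proved, stated in full; the proofs are below) =====
def Claim_equal_pretify_content : Prop := ∀ (content : String), Dom_pretify_content content → Pre_pretify_content content → Spec_pretify_content content (pretify_content content)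

-- ===== LEMMAS AND PROOFS =====

-- A tests line[-1] == ':', B tests line.endswith(':'): the two conditions coincide
lemma ends_iff (l : List Char) :
    PySem.Chars.endswith l [':'] = true ↔ PySem.List.pyGet? l (-1) = some ':' := by
  rw [PySem.List.pyGet?_neg_one, PySem.Chars.endswith_iff]
  constructor
  · rintro ⟨t, rfl⟩
    simp
  · intro h
    obtain ⟨ys, rfl⟩ := List.getLast?_eq_some_iff.mp h
    exact ⟨ys, rfl⟩

-- a nonempty prefix of res factors out of the rest of A's loop
lemma factor (ls : List (List Char)) (pre s : List Char) (hs : s ≠ []) (b : Bool) :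
    (ls.foldl pretifyStep (some (pre ++ s), b)).1
      = some (pre ++ ((ls.foldl pretifyStep (some s, b)).1.getD [])) := by
  induction ls generalizing s b with
  | nil => simp
  | cons l ls ih =>
    have hps : pre ++ s ≠ [] := by simp [hs]
    cases b <;>
      simp only [List.foldl_cons, pretifyStep, if_pos hs, if_pos hps, ite_true,
        ite_false, Bool.false_eq_true, List.append_assoc] <;>
      rw [ih _ (by simp [hs])]

-- once stop_join is set, A appends "\n" + line for every remaining line
lemma foldl_true (ls : List (List Char)) (s : List Char) (hs : s ≠ []) :
    ls.foldl pretifyStep (some s, true)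
      = (some (s ++ ls.flatMap (fun l => '\n' :: l)), true) := by
  induction ls generalizing s with
  | nil => simp
  | cons l ls ih =>
    simp only [List.foldl_cons, pretifyStep, if_pos hs, ite_self, if_pos trivial,
      List.flatMap_cons]
    rw [ih _ (by simp)]
    simp

lemma join_newline (a : List Char) (rs : List (List Char)) :
    '\n' :: PySem.Chars.join ['\n'] (a :: rs) = (a :: rs).flatMap (fun l => '\n' :: l) := by
  induction rs generalizing a with
  | nil => simp [PySem.Chars.join_singleton]
  | cons r rs ih =>
    rw [PySem.Chars.join_cons_cons, List.flatMap_cons, ← ih r]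
    simp

lemma alt_cons (l0 : List Char) (rest : List (List Char)) (hr : rest ≠ [])
    (hp : PySem.Chars.endswith l0 [':'] = false) :
    pretifyAltChars (l0 :: rest) = l0 ++ ' ' :: pretifyAltChars rest := by
  obtain ⟨a, as, rfl⟩ := List.exists_cons_of_ne_nil hr
  cases h : List.findIdx? (fun l => PySem.Chars.endswith l [':']) (a :: as) with
  | some i =>
    simp only [pretifyAltChars, List.findIdx?_cons, hp, Bool.false_eq_true, if_false, h,
      Option.map_some, Option.getD_some, List.take_succ_cons, List.drop_succ_cons,
      PySem.Chars.join_cons_cons]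
    split_ifs <;> simp [List.append_assoc]
  | none =>
    simp only [pretifyAltChars, List.findIdx?_cons, hp, Bool.false_eq_true, if_false, h,
      Option.map_none, Option.getD_none, List.length_cons]
    rw [List.take_of_length_le (by simp), List.take_of_length_le (by simp),
      List.drop_eq_nil_of_le (by simp), List.drop_eq_nil_of_le (by simp)]
    simp [PySem.Chars.join_cons_cons, List.append_assoc]

lemma main_lemma (lines : List (List Char)) (h0 : lines ≠ [])
    (hne : ∀ l ∈ lines, l ≠ []) :
    ((lines.foldl pretifyStep (none, false)).1).getD [] = pretifyAltChars lines := by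
  induction lines with
  | nil => exact absurd rfl h0
  | cons l0 rest ih =>
    have hl0 : l0 ≠ [] := hne l0 (by simp)
    cases rest with
    | nil =>
      cases hP : PySem.Chars.endswith l0 [':'] <;>
        simp [pretifyAltChars, pretifyStep, List.findIdx?_cons, hP,
          PySem.Chars.join_singleton]
    | cons r rs =>
      have hr : r ≠ [] := hne r (by simp)
      have ihr := ih (by simp) (fun l hl => hne l (List.mem_cons_of_mem _ hl))
      by_cases hp : PySem.Chars.endswith l0 [':'] = true
      · have hpy := (ends_iff l0).mp hp
        have hA : ((l0 :: r :: rs).foldl pretifyStep (none, false))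
            = (some (l0 ++ (r :: rs).flatMap (fun l => '\n' :: l)), true) := by
          rw [List.foldl_cons, show pretifyStep (none, false) l0 = (some l0, true) by
            simp [pretifyStep, hpy], foldl_true _ _ hl0]
        rw [hA]
        unfold pretifyAltChars
        rw [List.findIdx?_cons, if_pos hp]
        simp [PySem.Chars.join_singleton, ← join_newline r rs]
      · have hpy : ¬ PySem.List.pyGet? l0 (-1) = some ':' := fun h => by
          rw [(ends_iff l0).mpr h] at hp; exact hp rfl
        have hstep : pretifyStep (none, false) l0 = (some l0, false) := by
          simp [pretifyStep, hpy]
        have h2 : pretifyStep (some l0, false) r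
            = (some ((l0 ++ [' ']) ++ r), (pretifyStep (none, false) r).2) := by
          rw [Prod.ext_iff]
          refine ⟨?_, by simp [pretifyStep]⟩
          simp [pretifyStep, hl0]
        have h3 : pretifyStep (none, false) r
            = (some r, (pretifyStep (none, false) r).2) := by
          rw [Prod.ext_iff]
          exact ⟨by simp [pretifyStep], rfl⟩
        have hA : (((l0 :: r :: rs).foldl pretifyStep (none, false)).1).getD []
            = l0 ++ ' ' :: ((((r :: rs).foldl pretifyStep (none, false)).1).getD []) := by
          conv_rhs => rw [List.foldl_cons, h3]
          rw [List.foldl_cons, hstep, List.foldl_cons, h2,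
            factor rs (l0 ++ [' ']) r hr ((pretifyStep (none, false) r).2)]
          simp
        rw [hA, ihr, alt_cons l0 (r :: rs) (by simp) (by simpa using hp)]

-- ===== VERDICT (by name: the statement is the Claim_ definition above) =====
theorem pretify_content_spec : Claim_equal_pretify_content := by
  intro content _ hpre
  unfold Spec_pretify_content pretify_content pretify_content_alt
  exact congrArg String.mk (main_lemma _ hpre.1 hpre.2)
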